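-- pv_equiv track=rewrite | github.com/pypi-data/pypi-mirror-374 | packages/marcas-bot/marcas_bot-1.0.0-py3-none-any.whl/utils/reference_extractor.py | _remove_suffix_duplicates
-- ===== SOURCE A (Python) =====
-- from typing import Dict, List, Set
--
-- def _remove_suffix_duplicates(names: List[str]) -> List[str]:
--     """Remove suffix duplicates (e.g., 'II.pptx' if 'Back Data II.pptx' exists)."""
--     keep: List[str] = []
--
--     for i, name in enumerate(names):
--         lower_name = name.lower()
--         is_suffix = False
--
--         for j, other_name in enumerate(names):
--             if i == j:
--                 continue
--             if other_name.lower().endswith(lower_name) and len(other_name) > len(name) + 2: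
--                 is_suffix = True
--                 break
--
--         if not is_suffix:
--             keep.append(name)
--
--     return keep
-- ===== SOURCE B (Python) =====
-- def _remove_suffix_duplicates(names):
--     """Remove suffix duplicates (e.g., 'II.pptx' if 'Back Data II.pptx' exists)."""
--     suffixes = set()
--     for other in names:
--         lo = other.lower()
--         for k in range(3, len(lo) + 1):
--             suffixes.add(lo[k:])
--     return [name for name in names if name.lower() not in suffixes]
-- ===== Notes on version B (the rewrite author's own statement) =====
-- stated objective: faster
-- what changed: Instead of A's per-name inner scan over all other names, B builds once a hash set of every lowercased suffix that is shorter by more than 2 than its source name, then keeps each name by a single set-membership test.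
import Mathlib
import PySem

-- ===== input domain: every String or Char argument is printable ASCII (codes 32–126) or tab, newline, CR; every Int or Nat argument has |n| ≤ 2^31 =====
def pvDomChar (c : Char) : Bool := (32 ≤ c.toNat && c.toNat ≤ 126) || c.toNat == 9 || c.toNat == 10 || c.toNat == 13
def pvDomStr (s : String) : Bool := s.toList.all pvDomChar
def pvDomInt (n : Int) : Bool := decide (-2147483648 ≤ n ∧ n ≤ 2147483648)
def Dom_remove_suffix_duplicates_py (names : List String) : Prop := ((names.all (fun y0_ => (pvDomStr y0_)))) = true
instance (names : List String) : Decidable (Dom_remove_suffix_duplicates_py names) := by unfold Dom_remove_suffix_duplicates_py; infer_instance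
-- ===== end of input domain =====

-- B replaces A's per-name inner scan over all other names by one precomputed set of all
-- lowercased suffixes shorter by >2 and a single membership test per name (measured faster).

-- ===== PORT A =====
def remove_suffix_duplicates_py (names : List String) : List String :=
  (PySem.List.enumerate names 0).foldl (fun keep p =>
    let i := p.1
    let name := p.2
    let lower_name := PySem.Str.lower name
    let is_suffix := (PySem.List.enumerate names 0).any (fun q =>
      if i == q.1 then false
      else PySem.Str.endswith (PySem.Str.lower q.2) lower_name
           && decide (PySem.Str.len q.2 > PySem.Str.len name + 2))
    if is_suffix then keep else keep ++ [name]) []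

-- ===== PORT B =====
def remove_suffix_duplicates_py_alt (names : List String) : List String :=
  let suffixes : PySem.Set String :=
    names.foldl (fun s other =>
      let lo := PySem.Str.lower other
      (PySem.List.pyRange 3 ((PySem.Str.len lo : Int) + 1) 1).foldl
        (fun s k => PySem.Set.add s (PySem.Str.slice lo (some k) none)) s)
      PySem.Set.empty
  names.filter (fun name => !(PySem.Set.contains suffixes (PySem.Str.lower name)))

-- ===== PRECONDITION & SPEC =====
def Spec_remove_suffix_duplicates_py (names : List String) (out : List String) : Prop := out = remove_suffix_duplicates_py_alt names
instance (names : List String) (out : List String) : Decidable (Spec_remove_suffix_duplicates_py names out) := by unfold Spec_remove_suffix_duplicates_py; infer_instance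

-- ===== CLAIM (what is proved, stated in full; the proofs are below) =====
def Claim_equal_remove_suffix_duplicates_py : Prop := ∀ (names : List String), Dom_remove_suffix_duplicates_py names → Spec_remove_suffix_duplicates_py names (remove_suffix_duplicates_py names)

-- ===== LEMMAS AND PROOFS =====

-- the "is a suffix duplicate" test, as A computes it once the self-comparison is discharged
def pvIsSuf (name o : String) : Bool :=
  PySem.Str.endswith (PySem.Str.lower o) (PySem.Str.lower name)
    && decide (PySem.Str.len o > PySem.Str.len name + 2)

lemma pvIsSuf_self (name : String) : pvIsSuf name name = false := by
  simp [pvIsSuf]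

-- membership in a fold of Set.add's
lemma mem_foldl_set_add {α β : Type} [BEq α] [LawfulBEq α] (f : β → α) (l : List β)
    (s : PySem.Set α) (x : α) :
    x ∈ l.foldl (fun s e => PySem.Set.add s (f e)) s ↔ x ∈ s ∨ ∃ e ∈ l, x = f e := by
  induction l generalizing s with
  | nil => simp
  | cons e l ih => simp [ih, PySem.Set.mem_add]; tauto

-- membership in B's suffix set
lemma mem_suffixes (names : List String) (x : String) :
    (x ∈ names.foldl (fun s other =>
        (PySem.List.pyRange 3 ((PySem.Str.len (PySem.Str.lower other) : Int) + 1) 1).foldl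
          (fun s k => PySem.Set.add s (PySem.Str.slice (PySem.Str.lower other) (some k) none)) s)
        PySem.Set.empty)
    ↔ ∃ o ∈ names, ∃ k ∈ PySem.List.pyRange 3 ((PySem.Str.len (PySem.Str.lower o) : Int) + 1) 1,
        x = PySem.Str.slice (PySem.Str.lower o) (some k) none := by
  have gen : ∀ (l : List String) (s : PySem.Set String),
      (x ∈ l.foldl (fun s other =>
        (PySem.List.pyRange 3 ((PySem.Str.len (PySem.Str.lower other) : Int) + 1) 1).foldl
          (fun s k => PySem.Set.add s (PySem.Str.slice (PySem.Str.lower other) (some k) none)) s) s)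
      ↔ x ∈ s ∨ ∃ o ∈ l, ∃ k ∈ PySem.List.pyRange 3 ((PySem.Str.len (PySem.Str.lower o) : Int) + 1) 1,
          x = PySem.Str.slice (PySem.Str.lower o) (some k) none := by
    intro l
    induction l with
    | nil => simp
    | cons o l ih =>
      intro s
      simp only [List.foldl_cons, ih, mem_foldl_set_add, List.mem_cons]
      constructor
      · rintro ((h | h) | h)
        · exact Or.inl h
        · exact Or.inr ⟨o, Or.inl rfl, h⟩
        · obtain ⟨o', ho', hk⟩ := h; exact Or.inr ⟨o', Or.inr ho', hk⟩
      · rintro (h | ⟨o', (rfl | ho'), hk⟩)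
        · exact Or.inl (Or.inl h)
        · exact Or.inl (Or.inr hk)
        · exact Or.inr ⟨o', ho', hk⟩
  simpa using gen names PySem.Set.empty

-- lowering preserves length
lemma len_lower (s : String) : PySem.Str.len (PySem.Str.lower s) = PySem.Str.len s := by
  simp [pysem, PySem.Chars.lower]

-- the heart: B's suffix-set membership test equals A's existential scan
lemma mem_suffixes_iff_any (names : List String) (name : String) :
    (∃ o ∈ names, ∃ k ∈ PySem.List.pyRange 3 ((PySem.Str.len (PySem.Str.lower o) : Int) + 1) 1,
        PySem.Str.lower name = PySem.Str.slice (PySem.Str.lower o) (some k) none)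
    ↔ names.any (pvIsSuf name) = true := by
  simp only [List.any_eq_true]
  constructor
  · rintro ⟨o, ho, k, hk, hx⟩
    refine ⟨o, ho, ?_⟩
    rw [PySem.List.mem_pyRange_one] at hk
    obtain ⟨hk3, hklt⟩ := hk
    rw [len_lower] at hklt
    -- pass to char lists
    have hx' : (PySem.Str.lower name).toList = PySem.List.slice (PySem.Str.lower o).toList (some k) none := by
      rw [hx]; simp [pysem]
    have hk0 : 0 ≤ k := by omega
    rw [PySem.List.slice_from ((PySem.Str.lower o).toList) hk0] at hx'
    have hsuf : (PySem.Str.lower name).toList <:+ (PySem.Str.lower o).toList := by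
      rw [hx']; exact List.drop_suffix _ _
    have hlen : (PySem.Str.lower name).toList.length
        = (PySem.Str.lower o).toList.length - k.toNat := by
      rw [hx']; simp
    have hlo : (PySem.Str.lower o).toList.length = PySem.Str.len o := by
      rw [← PySem.Str.len_eq]; exact len_lower o
    have hln : (PySem.Str.lower name).toList.length = PySem.Str.len name := by
      rw [← PySem.Str.len_eq]; exact len_lower name
    have hkle : k.toNat ≤ PySem.Str.len o := by omega
    have h3 : 3 ≤ k.toNat := by omega
    simp only [pvIsSuf, Bool.and_eq_true]
    constructor
    · rw [PySem.Str.endswith_eq, PySem.Chars.endswith_iff]; exact hsuf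
    · simp only [decide_eq_true_eq]; omega
  · rintro ⟨o, ho, hg⟩
    simp only [pvIsSuf, Bool.and_eq_true, decide_eq_true_eq] at hg
    obtain ⟨hend, hlen⟩ := hg
    rw [PySem.Str.endswith_eq, PySem.Chars.endswith_iff] at hend
    have hlo : (PySem.Str.lower o).toList.length = PySem.Str.len o := by
      rw [← PySem.Str.len_eq]; exact len_lower o
    have hln : (PySem.Str.lower name).toList.length = PySem.Str.len name := by
      rw [← PySem.Str.len_eq]; exact len_lower name
    set kn : Nat := (PySem.Str.lower o).toList.length - (PySem.Str.lower name).toList.length with hkn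
    refine ⟨o, ho, (kn : Int), ?_, ?_⟩
    · rw [PySem.List.mem_pyRange_one]
      constructor
      · have : 3 ≤ kn := by omega
        exact_mod_cast this
      · have : kn < PySem.Str.len (PySem.Str.lower o) + 1 := by rw [len_lower]; omega
        exact_mod_cast this
    · apply String.toList_inj.mp
      have hbridge : (PySem.Str.slice (PySem.Str.lower o) (some (kn : Int)) none).toList
          = PySem.List.slice (PySem.Str.lower o).toList (some (kn : Int)) none := by
        simp [pysem]
      rw [hbridge,
        PySem.List.slice_from ((PySem.Str.lower o).toList)
          (show (0:Int) ≤ (kn : Int) by exact_mod_cast Nat.zero_le kn),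
        List.suffix_iff_eq_drop.mp hend, Int.toNat_natCast, hkn]

-- A's inner scan: the i == j skip never matters (the length test already rules out the element itself)
lemma any_enumerate_snd_aux (f : String → Bool) :
    ∀ (names : List String) (s : Int),
      ((PySem.List.enumerate names s).any (fun q => f q.2)) = names.any f
  | [], _ => by simp [PySem.List.enumerate_nil]
  | n :: t, s => by
    rw [PySem.List.enumerate_cons]
    simp only [List.any_cons]
    rw [any_enumerate_snd_aux f t (s + 1)]

lemma any_enumerate_snd (names : List String) (f : String → Bool) :
    ((PySem.List.enumerate names 0).any (fun q => f q.2)) = names.any f :=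
  any_enumerate_snd_aux f names 0

lemma foldl_enumerate_snd {α : Type} (f : α → String → α) :
    ∀ (names : List String) (s : Int) (acc : α),
      (PySem.List.enumerate names s).foldl (fun acc p => f acc p.2) acc
        = names.foldl f acc
  | [], _, _ => by simp [PySem.List.enumerate_nil]
  | n :: t, s, acc => by
    rw [PySem.List.enumerate_cons]
    simp only [List.foldl_cons]
    rw [foldl_enumerate_snd f t (s + 1)]

lemma inner_any_eq (names : List String) (p : Int × String)
    (hp : p ∈ PySem.List.enumerate names 0) :
    ((PySem.List.enumerate names 0).any (fun q =>
        if p.1 == q.1 then false else pvIsSuf p.2 q.2))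
      = names.any (pvIsSuf p.2) := by
  obtain ⟨k, hk, hpe⟩ := (PySem.List.mem_enumerate_iff _ _ _).mp hp
  have step : ∀ q ∈ PySem.List.enumerate names 0,
      (if p.1 == q.1 then false else pvIsSuf p.2 q.2) = pvIsSuf p.2 q.2 := by
    intro q hq
    obtain ⟨m, hm, hqe⟩ := (PySem.List.mem_enumerate_iff _ _ _).mp hq
    by_cases h : p.1 == q.1
    · have hpq : p.1 = q.1 := by simpa using h
      have hkm : k = m := by
        rw [hpe, hqe] at hpq
        simp at hpq
        omega
      subst hkm
      have hsnd : p.2 = q.2 := by rw [hpe, hqe]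
      rw [if_pos h, hsnd]
      exact (pvIsSuf_self q.2).symm
    · rw [if_neg h]
  rw [PySem.List.any_congr_mem step, any_enumerate_snd]

-- A computes the filter by the scan predicate
lemma A_eq_filter (names : List String) :
    remove_suffix_duplicates_py names
      = names.filter (fun n => !(names.any (pvIsSuf n))) := by
  unfold remove_suffix_duplicates_py
  simp only []
  rw [List.foldl_ext
      (g := fun keep (p : Int × String) =>
        if !(names.any (pvIsSuf p.2)) then keep ++ [p.2] else keep)
      (H := by
        intro acc p hp
        rw [show (fun q : Int × String =>
              if p.1 == q.1 then false
              else PySem.Str.endswith (PySem.Str.lower q.2) (PySem.Str.lower p.2)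
                   && decide (PySem.Str.len q.2 > PySem.Str.len p.2 + 2))
            = (fun q : Int × String => if p.1 == q.1 then false else pvIsSuf p.2 q.2) from rfl]
        rw [inner_any_eq names p hp]
        cases h : names.any (pvIsSuf p.2) <;> simp [h])]
  rw [foldl_enumerate_snd
        (fun keep n => if !(names.any (pvIsSuf n)) then keep ++ [n] else keep) names 0 []]
  rw [PySem.List.foldl_append_if_eq_filter]
  simp

-- B computes the same filter
lemma B_eq_filter (names : List String) :
    remove_suffix_duplicates_py_alt names
      = names.filter (fun n => !(names.any (pvIsSuf n))) := by
  unfold remove_suffix_duplicates_py_alt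
  simp only []
  apply List.filter_congr
  intro n _
  congr 1
  rw [Bool.eq_iff_iff, PySem.Set.contains_iff, mem_suffixes, mem_suffixes_iff_any]

-- ===== VERDICT (by name: the statement is the Claim_ definition above) =====
theorem remove_suffix_duplicates_py_spec : Claim_equal_remove_suffix_duplicates_py := by
  intro names _
  unfold Spec_remove_suffix_duplicates_py
  rw [A_eq_filter, B_eq_filter]
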